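-- pv_equiv track=rewrite | github.com/Venky3012/altuistrycoding | code1.py | is_step
-- ===== SOURCE A (Python) =====
-- def is_step(num):
--     if num < 10:
--         return True
--     pre_dig = num % 10
--     num //= 10
--
--     while num > 0:
--         cur_dig = num % 10
--         if abs(cur_dig - pre_dig) != 1:
--             return False
--         pre_dig = cur_dig
--         num //= 10
--
--     return True
-- ===== SOURCE B (Python) =====
-- def is_step(num):
--     if num < 10:
--         return True
--     s = str(num)
--     return all(abs(int(a) - int(b)) == 1 for a, b in zip(s, s[1:]))
-- ===== Notes on version B (the rewrite author's own statement) =====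
-- stated objective: idiomatic
-- what changed: B converts the number to its decimal string once and checks adjacent character pairs with all() over zip(s, s[1:]), instead of A's right-to-left modulo/floor-division loop carrying a running previous digit.
import Mathlib
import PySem

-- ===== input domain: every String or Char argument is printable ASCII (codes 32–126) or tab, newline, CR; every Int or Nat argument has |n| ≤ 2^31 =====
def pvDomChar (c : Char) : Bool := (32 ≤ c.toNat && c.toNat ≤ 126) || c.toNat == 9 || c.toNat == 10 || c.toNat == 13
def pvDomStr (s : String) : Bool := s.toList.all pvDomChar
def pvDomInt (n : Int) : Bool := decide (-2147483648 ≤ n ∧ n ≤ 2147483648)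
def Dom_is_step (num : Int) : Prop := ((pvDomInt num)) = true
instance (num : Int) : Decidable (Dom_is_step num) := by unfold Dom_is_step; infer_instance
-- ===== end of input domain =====

-- B replaces A's right-to-left modulo/floor-division digit loop by the idiomatic
-- string form: all adjacent decimal characters of str(num) differ by exactly 1.

-- ===== PORT A =====
-- the while loop of A; fuel bounds the iteration count (num//10 strictly decreases), purely a totality guard
def isStepLoop : Nat → Int → Int → Bool
  | 0, _, _ => true
  | fuel + 1, num, pre_dig =>
    if num > 0 then
      let cur_dig := PySem.Int.mod num 10
      if (cur_dig - pre_dig).natAbs ≠ 1 then false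
      else isStepLoop fuel (PySem.Int.floordiv num 10) cur_dig
    else true

def is_step (num : Int) : Bool :=
  if num < 10 then true
  else isStepLoop num.toNat (PySem.Int.floordiv num 10) (PySem.Int.mod num 10)

-- ===== PORT B =====
-- int(c) on the one-character strings from zip(s, s[1:]); it never fails on decimal digits, .getD 0 only totalizes
def is_step_alt (num : Int) : Bool :=
  if num < 10 then true
  else
    let s := PySem.Int.toChars num
    (s.zip (PySem.List.slice s (some 1) none)).all
      (fun p => ((PySem.Int.ofChars? [p.1]).getD 0 - (PySem.Int.ofChars? [p.2]).getD 0).natAbs == 1)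

-- ===== PRECONDITION & SPEC =====
def Spec_is_step (num : Int) (out : Bool) : Prop := out = is_step_alt num
instance (num : Int) (out : Bool) : Decidable (Spec_is_step num out) := by unfold Spec_is_step; infer_instance

-- ===== CLAIM (what is proved, stated in full; the proofs are below) =====
def Claim_equal_is_step : Prop := ∀ (num : Int), Dom_is_step num → Spec_is_step num (is_step num)

-- ===== LEMMAS AND PROOFS =====

/-- adjacent-pairs check -/
def adjAll {α : Type} (p : α → α → Bool) : List α → Bool
  | a :: b :: t => p a b && adjAll p (b :: t)
  | _ => true

def pInt : Int → Int → Bool := fun a b => (a - b).natAbs == 1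
def qNat : Nat → Nat → Bool := fun a b => ((a : Int) - (b : Int)).natAbs == 1

theorem adjAll_zip {α : Type} (p : α → α → Bool) (l : List α) :
    (l.zip l.tail).all (fun q => p q.1 q.2) = adjAll p l := by
  induction l with
  | nil => rfl
  | cons a t ih =>
    cases t with
    | nil => rfl
    | cons b u => simp [adjAll, List.zip, ← ih]

theorem adjAll_map {α β : Type} (p : β → β → Bool) (g : α → β) (l : List α) :
    adjAll p (l.map g) = adjAll (fun a b => p (g a) (g b)) l := by
  induction l with
  | nil => rfl
  | cons a t ih =>
    cases t with
    | nil => rfl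
    | cons b u => simp [adjAll] at ih ⊢; rw [ih]

theorem adjAll_congr {α : Type} (p q : α → α → Bool) (l : List α)
    (h : ∀ a ∈ l, ∀ b ∈ l, p a b = q a b) :
    adjAll p l = adjAll q l := by
  induction l with
  | nil => rfl
  | cons a t ih =>
    cases t with
    | nil => rfl
    | cons b u =>
      simp only [adjAll]
      rw [h a (by simp) b (by simp), ih (fun x hx y hy => h x (by simp [hx]) y (by simp [hy]))]

theorem adjAll_snoc {α : Type} (p : α → α → Bool) (l : List α) (a : α) :
    adjAll p (l ++ [a]) = (adjAll p l && (match l.getLast? with | none => true | some b => p b a)) := by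
  induction l with
  | nil => rfl
  | cons x t ih =>
    cases t with
    | nil => simp [adjAll]
    | cons y u =>
      simp only [List.cons_append, adjAll] at ih ⊢
      rw [ih]
      simp [List.getLast?_cons_cons, Bool.and_assoc]

theorem adjAll_reverse {α : Type} (p : α → α → Bool) (hsym : ∀ a b, p a b = p b a) (l : List α) :
    adjAll p l.reverse = adjAll p l := by
  induction l with
  | nil => rfl
  | cons a t ih =>
    rw [List.reverse_cons, adjAll_snoc, ih]
    cases t with
    | nil => rfl
    | cons b u =>
      rw [List.getLast?_reverse]
      simp only [List.head?_cons, adjAll]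
      rw [hsym b a, Bool.and_comm]

/-- core toDigitsCore characterization -/
theorem toDigitsCore_eq (fuel n : Nat) (ds : List Char) (hn : 0 < n) (hf : n ≤ fuel) :
    Nat.toDigitsCore 10 fuel n ds = ((Nat.digits 10 n).map Nat.digitChar).reverse ++ ds := by
  induction fuel generalizing n ds with
  | zero => omega
  | succ f ih =>
    rw [Nat.toDigitsCore]
    rw [Nat.digits_def' (by norm_num : 1 < 10) hn]
    by_cases h : n / 10 = 0
    · simp [h]
    · rw [if_neg h, ih (n / 10) _ (Nat.pos_of_ne_zero h) (by omega)]
      simp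

theorem toDigits_eq (n : Nat) (hn : 0 < n) :
    Nat.toDigits 10 n = ((Nat.digits 10 n).map Nat.digitChar).reverse := by
  rw [Nat.toDigits, toDigitsCore_eq (n + 1) n [] hn (by omega)]
  simp

theorem loop_eq (fuel m : Nat) (pre : Int) (hf : m ≤ fuel) :
    isStepLoop fuel (m : Int) pre
      = adjAll pInt (pre :: (Nat.digits 10 m).map Int.ofNat) := by
  induction fuel generalizing m pre with
  | zero =>
    interval_cases m
    rfl
  | succ f ih =>
    by_cases hm : 0 < m
    · rw [isStepLoop]
      rw [if_pos (by exact_mod_cast hm)]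
      show (if (PySem.Int.mod (m : Int) 10 - pre).natAbs ≠ 1 then false
            else isStepLoop f (PySem.Int.floordiv (m : Int) 10) (PySem.Int.mod (m : Int) 10)) = _
      have hmod : PySem.Int.mod (m : Int) 10 = ((m % 10 : Nat) : Int) := by
        exact_mod_cast PySem.Int.mod_natCast m 10
      have hdiv : PySem.Int.floordiv (m : Int) 10 = ((m / 10 : Nat) : Int) := by
        exact_mod_cast PySem.Int.floordiv_natCast m 10
      rw [Nat.digits_def' (by norm_num : 1 < 10) hm, List.map_cons]
      rw [hmod, hdiv]
      rw [ih (m / 10) _ (by omega)]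
      show (if ((Int.ofNat (m % 10)) - pre).natAbs ≠ 1 then false
            else adjAll pInt (Int.ofNat (m % 10) :: (Nat.digits 10 (m / 10)).map Int.ofNat))
          = (pInt pre (Int.ofNat (m % 10)) && adjAll pInt (Int.ofNat (m % 10) :: (Nat.digits 10 (m / 10)).map Int.ofNat))
      by_cases hc : ((Int.ofNat (m % 10)) - pre).natAbs = 1
      · rw [if_neg (by omega)]
        have hp : pInt pre (Int.ofNat (m % 10)) = true := by
          simp only [pInt, beq_iff_eq]; omega
        rw [hp, Bool.true_and]
      · rw [if_pos (by omega)]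
        have hp : pInt pre (Int.ofNat (m % 10)) = false := by
          simp only [pInt, beq_eq_false_iff_ne, ne_eq]; omega
        rw [hp, Bool.false_and]
    · have : m = 0 := by omega
      subst this
      rfl

theorem digit_pair (a b : Nat) (ha : a < 10) (hb : b < 10) :
    (((PySem.Int.ofChars? [Nat.digitChar a]).getD 0 - (PySem.Int.ofChars? [Nat.digitChar b]).getD 0).natAbs == 1)
      = qNat a b := by
  interval_cases a <;> interval_cases b <;> decide

theorem qNat_symm (a b : Nat) : qNat a b = qNat b a := by
  simp only [qNat]
  have : ((a : Int) - b).natAbs = ((b : Int) - a).natAbs := by omega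
  rw [this]

-- ===== VERDICT (by name: the statement is the Claim_ definition above) =====
theorem is_step_spec : Claim_equal_is_step := by
  intro num _
  unfold Spec_is_step
  by_cases h : num < 10
  · unfold is_step is_step_alt
    rw [if_pos h, if_pos h]
  · have h10 : (10 : Int) ≤ num := by omega
    set n := num.toNat with hn
    have hnum : (n : Int) = num := Int.toNat_of_nonneg (by omega)
    have hn10 : 10 ≤ n := by omega
    have hdig : Nat.digits 10 n = n % 10 :: Nat.digits 10 (n / 10) :=
      Nat.digits_def' (by norm_num) (by omega)
    have hA : is_step num = adjAll qNat (Nat.digits 10 n) := by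
      unfold is_step
      rw [if_neg h]
      have hmod : PySem.Int.mod num 10 = ((n % 10 : Nat) : Int) := by
        rw [← hnum]; exact_mod_cast PySem.Int.mod_natCast n 10
      have hdiv : PySem.Int.floordiv num 10 = ((n / 10 : Nat) : Int) := by
        rw [← hnum]; exact_mod_cast PySem.Int.floordiv_natCast n 10
      rw [hmod, hdiv, loop_eq n (n / 10) _ (by omega), hdig]
      rw [show (((n % 10 : Nat) : Int) :: (Nat.digits 10 (n / 10)).map Int.ofNat)
            = (n % 10 :: Nat.digits 10 (n / 10)).map Int.ofNat from rfl, adjAll_map]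
      rfl
    have hB : is_step_alt num = adjAll qNat (Nat.digits 10 n) := by
      unfold is_step_alt
      rw [if_neg h]
      show ((PySem.Int.toChars num).zip (PySem.List.slice (PySem.Int.toChars num) (some 1) none)).all
        (fun p => ((PySem.Int.ofChars? [p.1]).getD 0 - (PySem.Int.ofChars? [p.2]).getD 0).natAbs == 1) = _
      have htc : PySem.Int.toChars num = ((Nat.digits 10 n).map Nat.digitChar).reverse := by
        simp only [PySem.Int.toChars]
        rw [if_neg (by omega), ← hn, toDigits_eq n (by omega)]
      rw [htc, PySem.List.slice_from_one]
      rw [adjAll_zip (fun a b =>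
        ((PySem.Int.ofChars? [a]).getD 0 - (PySem.Int.ofChars? [b]).getD 0).natAbs == 1)]
      rw [← List.map_reverse, adjAll_map]
      rw [adjAll_congr _ qNat _ (fun a ha b hb =>
        digit_pair a b
          (Nat.digits_lt_base (by norm_num) (List.mem_reverse.mp ha))
          (Nat.digits_lt_base (by norm_num) (List.mem_reverse.mp hb)))]
      rw [adjAll_reverse qNat qNat_symm]
    rw [hA, hB]
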